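-- pv_equiv track=rewrite | github.com/kms1234567/Study | Algorithm/hash/[PGM]위장.py | solution
-- ===== SOURCE A (Python) =====
-- from collections import defaultdict
-- from collections import defaultdict
--
-- def solution(clothes):
--     answer = 1
--     clothes_dict = defaultdict(int)
--     for _, kind in clothes:
--         clothes_dict[kind] += 1
--     for key in clothes_dict.keys():
--         answer *= (clothes_dict[key]+1)
--     return answer - 1
-- ===== SOURCE B (Python) =====
-- def solution(clothes):
--     def go(ks):
--         if not ks:
--             return 1
--         k = ks[0]
--         rest = [x for x in ks[1:] if x != k]
--         return (ks.count(k) + 1) * go(rest)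
--     return go([kind for _, kind in clothes]) - 1
-- ===== Notes on version B (the rewrite author's own statement) =====
-- stated objective: alternative
-- what changed: Replaces the defaultdict counting pass plus product loop over dict keys by a direct recursion that peels the first kind, multiplies (its count + 1) and recurses on the list with that kind filtered out; no dictionary is built.
import Mathlib
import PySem

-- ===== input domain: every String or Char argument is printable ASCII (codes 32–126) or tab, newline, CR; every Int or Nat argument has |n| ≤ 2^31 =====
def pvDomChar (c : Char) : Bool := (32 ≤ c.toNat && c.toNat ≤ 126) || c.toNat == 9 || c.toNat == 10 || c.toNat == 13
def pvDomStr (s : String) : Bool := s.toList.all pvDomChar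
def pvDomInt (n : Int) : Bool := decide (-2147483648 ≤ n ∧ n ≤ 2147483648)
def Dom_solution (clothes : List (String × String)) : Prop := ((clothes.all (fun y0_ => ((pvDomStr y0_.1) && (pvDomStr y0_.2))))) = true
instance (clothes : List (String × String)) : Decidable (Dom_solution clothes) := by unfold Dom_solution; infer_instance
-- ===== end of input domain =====

-- B replaces A's defaultdict counting + dict-key product loop by a dictionary-free
-- recursion peeling one kind at a time (alternative decomposition, same result).


-- ===== PORT A =====
def solution (clothes : List (String × String)) : Int :=
  let clothes_dict : PySem.Dict String Int :=
    clothes.foldl (fun d p => d.modify p.2 0 (· + 1)) PySem.Dict.empty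
  let answer : Int :=
    clothes_dict.keys.foldl (fun a key => a * (clothes_dict.getD key 0 + 1)) 1
  answer - 1

-- ===== PORT B =====
def pvGo : List String → Int
  | [] => 1
  | k :: ks => (((k :: ks).count k : Int) + 1) * pvGo (ks.filter (fun x => x != k))
termination_by l => l.length
decreasing_by simpa using Nat.lt_succ_of_le (List.length_filter_le _ _)

def solution_alt (clothes : List (String × String)) : Int :=
  pvGo (clothes.map (fun p => p.2)) - 1

-- ===== PRECONDITION & SPEC =====
def Spec_solution (clothes : List (String × String)) (out : Int) : Prop := out = solution_alt clothes
instance (clothes : List (String × String)) (out : Int) : Decidable (Spec_solution clothes out) := by unfold Spec_solution; infer_instance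

-- ===== CLAIM (what is proved, stated in full; the proofs are below) =====
def Claim_equal_solution : Prop := ∀ (clothes : List (String × String)), Dom_solution clothes → Spec_solution clothes (solution clothes)

-- ===== LEMMAS AND PROOFS =====

-- a multiply-accumulate foldl is the accumulator times a product
theorem pv_foldl_mul {α : Type} (l : List α) (f : α → Int) (a : Int) :
    l.foldl (fun acc k => acc * f k) a = a * (l.map f).prod := by
  induction l generalizing a with
  | nil => simp
  | cons x xs ih => simp [ih, mul_assoc]

-- A's result is the product of (count+1) over the distinct kinds
theorem pv_A_char (clothes : List (String × String)) :
    solution clothes =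
      ((PySem.Set.ofList (clothes.map (fun p => p.2))).map
        (fun k => ((clothes.map (fun p => p.2)).count k : Int) + 1)).prod - 1 := by
  have hfold : clothes.foldl (fun d p => d.modify p.2 0 (· + 1)) PySem.Dict.empty
      = PySem.Dict.counter (clothes.map (fun p => p.2)) := by
    rw [PySem.Dict.counter_eq_foldl]
    simp [List.foldl_map]
  simp only [solution, hfold, PySem.Dict.keys_counter, pv_foldl_mul, one_mul]
  have hmap : (List.map (fun k => (PySem.Dict.counter (clothes.map (fun p => p.2))).getD k 0 + 1)
      (PySem.Set.ofList (clothes.map (fun p => p.2)))) =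
    (List.map (fun k => ((clothes.map (fun p => p.2)).count k : Int) + 1)
      (PySem.Set.ofList (clothes.map (fun p => p.2)))) :=
    List.map_congr_left (fun k _ => by rw [PySem.Dict.getD_counter])
  rw [hmap]

theorem pv_toFinset_ofList (ks : List String) :
    (PySem.Set.ofList ks).toFinset = ks.toFinset := by
  ext x
  simp [PySem.Set.mem_ofList]

-- B's recursion computes the same product, stated over the Finset of kinds
theorem pv_B_char_aux (n : Nat) : ∀ ks : List String, ks.length ≤ n →
    pvGo ks = ∏ k ∈ ks.toFinset, ((ks.count k : Int) + 1) := by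
  induction n with
  | zero =>
    intro ks h
    match ks with
    | [] => simp [pvGo]
    | _ :: _ => simp at h
  | succ n ihn =>
    intro ks h
    match ks with
    | [] => simp [pvGo]
    | k :: ks =>
    have hlen : (ks.filter (fun x => x != k)).length ≤ n :=
      le_trans (List.length_filter_le _ _) (Nat.le_of_succ_le_succ (by simpa using h))
    have ih := ihn (ks.filter (fun x => x != k)) hlen
    rw [pvGo, ih]
    have hmem : k ∈ (k :: ks).toFinset := by simp
    rw [← Finset.mul_prod_erase _ _ hmem]
    congr 1
    have hset : ((k :: ks).toFinset).erase k = (ks.filter (fun x => x != k)).toFinset := by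
      ext x
      simp only [List.mem_toFinset, Finset.mem_erase, List.mem_cons, List.mem_filter,
        bne_iff_ne, ne_eq]
      tauto
    rw [hset]
    apply Finset.prod_congr rfl
    intro x hx
    have hxk : x ≠ k := by
      rw [← hset] at hx
      exact (Finset.mem_erase.mp hx).1
    congr 2
    simp [List.count_filter, hxk, Ne.symm hxk]

theorem pv_B_char (ks : List String) :
    pvGo ks = ∏ k ∈ ks.toFinset, ((ks.count k : Int) + 1) :=
  pv_B_char_aux ks.length ks le_rfl

-- ===== VERDICT (by name: the statement is the Claim_ definition above) =====
theorem solution_spec : Claim_equal_solution := by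
  intro clothes _
  show solution clothes = solution_alt clothes
  rw [pv_A_char, solution_alt, pv_B_char]
  congr 1
  rw [← pv_toFinset_ofList, List.prod_toFinset _ (PySem.Set.nodup_ofList _)]
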